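-- pv_equiv track=rewrite | github.com/tmarsha9/advent_of_code_2018 | day2/part1/main.py | count
-- ===== SOURCE A (Python) =====
-- def count(line):
--   checked  = set()
--   two_rv   = False
--   three_rv = False
--
--   for i,char in enumerate(line):
--     if char not in checked:
--       checked.add(char)
--       count = 1
--       for j,char2 in enumerate(line[i+1:]):
--         if char == char2:
--           count += 1
--       if count == 2:
--         two_rv = True
--       elif count == 3:
--         three_rv = True
--
--   return two_rv, three_rv
-- ===== SOURCE B (Python) =====
-- def count(line):
--   counts = {}
--   for ch in line:
--     counts[ch] = counts.get(ch, 0) + 1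
--   vals = counts.values()
--   return (2 in vals, 3 in vals)
-- ===== Notes on version B (the rewrite author's own statement) =====
-- stated objective: faster
-- what changed: Replaces the O(n^2) scheme (for each first occurrence, rescan the rest of the string to count it) with a single pass building a character-frequency dict, then testing whether 2 or 3 occurs among the counts.
import Mathlib
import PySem

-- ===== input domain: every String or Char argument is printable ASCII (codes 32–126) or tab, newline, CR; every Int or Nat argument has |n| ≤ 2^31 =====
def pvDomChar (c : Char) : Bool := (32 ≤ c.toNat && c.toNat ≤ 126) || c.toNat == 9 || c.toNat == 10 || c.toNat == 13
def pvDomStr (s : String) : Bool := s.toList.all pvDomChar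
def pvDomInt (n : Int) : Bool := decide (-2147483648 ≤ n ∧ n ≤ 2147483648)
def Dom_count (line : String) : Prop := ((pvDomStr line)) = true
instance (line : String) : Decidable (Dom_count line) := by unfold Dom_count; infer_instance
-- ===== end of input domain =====

-- B is a one-pass frequency-dict re-implementation of A's quadratic rescan; return values proved equal on all inputs.

-- ===== PORT A =====
-- A: for each character at index i not seen before, rescan line[i+1:] counting equal
-- characters; set two_rv / three_rv when that total is exactly 2 / 3.
def countStep (l : List Char) (s : PySem.Set Char × Bool × Bool) (p : Int × Char) :
    PySem.Set Char × Bool × Bool :=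
  if s.1.contains p.2 then s
  else
    let checked := PySem.Set.add s.1 p.2
    let cnt := (PySem.List.enumerate (PySem.List.slice l (some (p.1 + 1)) none)).foldl
      (fun c q => if p.2 == q.2 then c + 1 else c) (1 : Int)
    if cnt = 2 then (checked, true, s.2.2)
    else if cnt = 3 then (checked, s.2.1, true)
    else (checked, s.2.1, s.2.2)

def count (line : String) : Bool × Bool :=
  let l := line.toList
  let st := (PySem.List.enumerate l).foldl (countStep l) (PySem.Set.empty, false, false)
  (st.2.1, st.2.2)

-- ===== PORT B =====
-- B: build a frequency dict in one pass, then test membership of 2 and 3 among its values.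
def count_alt (line : String) : Bool × Bool :=
  let counts := line.toList.foldl
    (fun (d : PySem.Dict Char Int) ch => d.insert ch (d.getD ch 0 + 1)) PySem.Dict.empty
  let vals := counts.values
  (vals.contains 2, vals.contains 3)

-- ===== PRECONDITION & SPEC =====
def Spec_count (line : String) (out : Bool × Bool) : Prop := out = count_alt line
instance (line : String) (out : Bool × Bool) : Decidable (Spec_count line out) := by unfold Spec_count; infer_instance

-- ===== CLAIM (what is proved, stated in full; the proofs are below) =====
def Claim_equal_count : Prop := ∀ (line : String), Dom_count line → Spec_count line (count line)

-- ===== LEMMAS AND PROOFS =====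

-- A's inner loop over enumerate(line[i+1:]) counts the occurrences of p.2 there.
lemma enum_count_fold (ch : Char) (ys : List Char) (k : Int) (a : Int) :
    (PySem.List.enumerate ys k).foldl (fun c q => if ch == q.2 then c + 1 else c) a
      = a + (ys.count ch : Int) := by
  induction ys generalizing k a with
  | nil => simp [PySem.List.enumerate]
  | cons y t ih =>
    simp only [PySem.List.enumerate, List.foldl_cons, ih, List.count_cons]
    by_cases h : ch = y
    · simp [h]; ring
    · simp [h, Ne.symm h]

-- A's outer loop: the two flags become ORs of "count in the whole line is 2 / 3"
-- over the characters of the remaining suffix that are not yet checked.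
lemma loopA (l : List Char) (xs : List Char) (i : Nat) (hx : l.drop i = xs)
    (checked : PySem.Set Char)
    (hch : ∀ c, checked.contains c = (l.take i).contains c)
    (two three : Bool) :
    (PySem.List.enumerate xs (i : Int)).foldl (countStep l) (checked, two, three)
      = (PySem.Set.update checked xs,
         two || xs.any (fun c => !checked.contains c && (l.count c == 2)),
         three || xs.any (fun c => !checked.contains c && (l.count c == 3))) := by
  induction xs generalizing i checked two three with
  | nil => simp [PySem.List.enumerate, PySem.Set.update]
  | cons x t ih =>
    have hi : i < l.length := by
      by_contra h
      rw [List.drop_eq_nil_of_le (by omega)] at hx; exact (List.cons_ne_nil _ _) hx.symm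
    have hcons := List.drop_eq_getElem_cons hi
    rw [hx] at hcons
    obtain ⟨hget', hdrop1'⟩ := List.cons.inj hcons
    have hget : l[i] = x := hget'.symm
    have hdrop1 : l.drop (i + 1) = t := hdrop1'.symm
    have hgetl : l.take (i + 1) = l.take i ++ [x] := by
      rw [List.take_add_one, hget.symm]
      simp [List.getElem?_eq_getElem hi]
    have hslice : PySem.List.slice l (some ((i : Int) + 1)) none = t := by
      have h' : ((i : Int) + 1) = ((i + 1 : Nat) : Int) := by push_cast; ring
      rw [h', PySem.List.slice_from_natCast, hdrop1]
    have hcnt : (PySem.List.enumerate (PySem.List.slice l (some ((i : Int) + 1)) none)).foldl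
        (fun c q => if x == q.2 then c + 1 else c) (1 : Int) = 1 + (t.count x : Int) := by
      rw [hslice, enum_count_fold]
    have henum : PySem.List.enumerate (x :: t) (i : Int)
        = ((i : Int), x) :: PySem.List.enumerate t ((i : Int) + 1) := rfl
    have hcast : ((i : Int) + 1) = ((i + 1 : Nat) : Int) := by push_cast; ring
    have hcount : l.count x = (l.take i).count x + 1 + t.count x := by
      have h1 : l.count x = (l.take (i+1)).count x + (l.drop (i+1)).count x := by
        rw [← List.count_append, List.take_append_drop]
      rw [h1, hgetl, hdrop1, List.count_append]
      simp
    rw [henum, List.foldl_cons]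
    by_cases hc : checked.contains x = true
    · -- already checked: step is the identity, and x is also in take i
      have htk : (l.take i).contains x = true := by rw [← hch]; exact hc
      have hmemx : x ∈ checked := List.contains_iff_mem.mp hc
      have hstep : countStep l (checked, two, three) ((i : Int), x) = (checked, two, three) := by
        simp [countStep, hmemx]
      rw [hstep, hcast, ih (i+1) hdrop1 checked
          (by intro c
              rw [hgetl, List.contains_append, ← hch]
              by_cases hcx : c = x
              · subst hcx; simp [hmemx]
              · simp [hcx])
          two three]
      simp [PySem.Set.update, PySem.Set.add, hmemx]
    · -- new character
      have hc' : checked.contains x = false := by simpa using hc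
      have hnm : x ∉ checked := by
        intro h; exact hc (List.contains_iff_mem.mpr h)
      have htk : (l.take i).contains x = false := by rw [← hch]; exact hc'
      have htkcnt : (l.take i).count x = 0 := by
        rw [List.count_eq_zero]
        intro hmem'
        rw [← List.contains_iff_mem, htk] at hmem'
        exact Bool.false_ne_true hmem'
      have haddc : ∀ c, (PySem.Set.add checked x).contains c = (checked.contains c || (c == x)) := by
        intro c
        simp only [PySem.Set.add, PySem.Set.contains]
        by_cases hcc : c ∈ checked <;> by_cases hcx : c = x <;>
          simp [hnm, hcc, hcx, List.mem_append]
      have hchecked' : ∀ c, (PySem.Set.add checked x).contains c = (l.take (i+1)).contains c := by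
        intro c
        rw [haddc, hgetl, List.contains_append, hch, List.contains_cons]
        simp
      have hupd : PySem.Set.update (PySem.Set.add checked x) t = PySem.Set.update checked (x :: t) := by
        simp [PySem.Set.update]
      have hany : ∀ (k : Nat), l.count x ≠ k →
          t.any (fun c => !(PySem.Set.add checked x).contains c && (l.count c == k))
            = t.any (fun c => !checked.contains c && (l.count c == k)) := by
        intro k hk
        apply PySem.List.any_congr_mem
        intro c hcm
        rw [haddc]
        by_cases hcx : c = x
        · subst hcx
          have hkk : (l.count c == k) = false := by simp [hk]
          simp [hkk]
        · have hxx : (c == x) = false := by simp [hcx]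
          simp [hxx]
      have hbne : ∀ (k : Nat), l.count x ≠ k → (l.count x == k) = false :=
        fun k hk => beq_eq_false_iff_ne.mpr hk
      by_cases h2 : (1 : Int) + (t.count x : Int) = 2
      · have hl2 : l.count x = 2 := by omega
        have hne3 : l.count x ≠ 3 := by omega
        have hstep : countStep l (checked, two, three) ((i : Int), x)
            = (PySem.Set.add checked x, true, three) := by
          simp only [countStep, hc', hcnt]
          simp [h2]
        rw [hstep, hcast, ih (i+1) hdrop1 _ hchecked' true three, hupd]
        simp only [Prod.mk.injEq]
        refine ⟨trivial, ?_, ?_⟩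
        · simp [hnm, hl2]
        · rw [hany 3 hne3]
          simp only [List.any_cons]
          simp [hbne 3 hne3, hnm]
      · by_cases h3 : (1 : Int) + (t.count x : Int) = 3
        · have hl3 : l.count x = 3 := by omega
          have hne2 : l.count x ≠ 2 := by omega
          have hstep : countStep l (checked, two, three) ((i : Int), x)
              = (PySem.Set.add checked x, two, true) := by
            simp only [countStep, hc', hcnt]
            simp [h3]
          rw [hstep, hcast, ih (i+1) hdrop1 _ hchecked' two true, hupd]
          simp only [Prod.mk.injEq]
          refine ⟨trivial, ?_, ?_⟩
          · rw [hany 2 hne2]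
            simp only [List.any_cons]
            simp [hbne 2 hne2, hnm]
          · simp [hnm, hl3]
        · have hne2 : l.count x ≠ 2 := by omega
          have hne3 : l.count x ≠ 3 := by omega
          have hstep : countStep l (checked, two, three) ((i : Int), x)
              = (PySem.Set.add checked x, two, three) := by
            simp only [countStep, hc', hcnt]
            simp [h2, h3]
          rw [hstep, hcast, ih (i+1) hdrop1 _ hchecked' two three, hupd]
          simp only [Prod.mk.injEq]
          refine ⟨trivial, ?_, ?_⟩
          · rw [hany 2 hne2]
            simp only [List.any_cons]
            simp [hbne 2 hne2, hnm]
          · rw [hany 3 hne3]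
            simp only [List.any_cons]
            simp [hbne 3 hne3, hnm]

-- B's result: membership of k among the counter values is an "any" over the distinct characters.
lemma altContains (l : List Char) (k : Int) :
    ((l.foldl (fun (d : PySem.Dict Char Int) ch => d.insert ch (d.getD ch 0 + 1))
        PySem.Dict.empty).values).contains k
      = (PySem.Set.ofList l).any (fun c => (l.count c : Int) == k) := by
  rw [PySem.Dict.foldl_insert_getD_add_one_eq_counter]
  have : (PySem.Dict.counter l).values
      = ((PySem.Dict.counter l).items).map (·.2) := rfl
  rw [this, PySem.Dict.items_counter]
  rw [Bool.eq_iff_iff]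
  simp [List.mem_map, PySem.Set.mem_ofList, List.any_eq_true]

theorem count_spec_aux (line : String) : count line = count_alt line := by
  have hmain := loopA line.toList line.toList 0 (by simp) PySem.Set.empty
    (by intro c; simp [PySem.Set.empty, PySem.Set.contains]) false false
  simp only [Nat.cast_zero] at hmain
  simp only [count, count_alt, hmain]
  rw [altContains line.toList 2, altContains line.toList 3]
  have hemp : ∀ c : Char, PySem.Set.empty.contains c = false := by
    intro c; simp [PySem.Set.empty, PySem.Set.contains]
  simp only [Prod.mk.injEq]
  refine ⟨?_, ?_⟩ <;>
  · rw [Bool.eq_iff_iff]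
    simp only [Bool.false_or, List.any_eq_true, PySem.Set.mem_ofList, hemp, Bool.not_false,
      Bool.true_and]
    constructor
    · rintro ⟨c, hc, h⟩
      refine ⟨c, hc, ?_⟩
      rw [beq_iff_eq] at h ⊢; exact_mod_cast h
    · rintro ⟨c, hc, h⟩
      refine ⟨c, hc, ?_⟩
      rw [beq_iff_eq] at h ⊢; exact_mod_cast h

-- ===== VERDICT (by name: the statement is the Claim_ definition above) =====
theorem count_spec : Claim_equal_count := by
  intro line _
  exact count_spec_aux line
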